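-- pv_equiv track=rewrite | github.com/baobab00/kgn | tests/test_lsp_tokens.py | _data_to_absolute
-- ===== SOURCE A (Python) =====
-- def _data_to_absolute(
--     data: list[int],
-- ) -> list[tuple[int, int, int, int, int]]:
--     """Convert delta-encoded token data to absolute (line, col, len, type, mod) tuples."""
--     tokens: list[tuple[int, int, int, int, int]] = []
--     prev_line = 0
--     prev_col = 0
--     for i in range(0, len(data), 5):
--         dl, dc, length, tidx, mmask = data[i : i + 5]
--         line = prev_line + dl
--         col = dc if dl > 0 else prev_col + dc
--         tokens.append((line, col, length, tidx, mmask))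
--         prev_line = line
--         prev_col = col
--     return tokens
-- ===== SOURCE B (Python) =====
-- def _data_to_absolute(
--     data: list[int],
-- ) -> list[tuple[int, int, int, int, int]]:
--     """Convert delta-encoded token data to absolute (line, col, len, type, mod) tuples."""
--     it = iter(data)
--     chunks = list(zip(it, it, it, it, it, strict=True))
--     if not chunks:
--         return []
--     dls, dcs, lens, tids, mods = zip(*chunks)
--     lines = []
--     line = 0
--     for dl in dls:
--         line += dl
--         lines.append(line)
--     cols = []
--     col = 0
--     for dl, dc in zip(dls, dcs):
--         col = dc if dl > 0 else col + dc
--         cols.append(col)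
--     return list(zip(lines, cols, lens, tids, mods))
-- ===== Notes on version B (the rewrite author's own statement) =====
-- stated objective: alternative
-- what changed: B replaces A's single stateful chunk-by-chunk loop with a columnar decomposition: it chunks the flat data into 5-tuples, transposes them into five columns, computes absolute lines as a running prefix sum, computes columns as a segmented prefix sum (reset when dl>0), and zips the columns back into tuples.
import Mathlib
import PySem

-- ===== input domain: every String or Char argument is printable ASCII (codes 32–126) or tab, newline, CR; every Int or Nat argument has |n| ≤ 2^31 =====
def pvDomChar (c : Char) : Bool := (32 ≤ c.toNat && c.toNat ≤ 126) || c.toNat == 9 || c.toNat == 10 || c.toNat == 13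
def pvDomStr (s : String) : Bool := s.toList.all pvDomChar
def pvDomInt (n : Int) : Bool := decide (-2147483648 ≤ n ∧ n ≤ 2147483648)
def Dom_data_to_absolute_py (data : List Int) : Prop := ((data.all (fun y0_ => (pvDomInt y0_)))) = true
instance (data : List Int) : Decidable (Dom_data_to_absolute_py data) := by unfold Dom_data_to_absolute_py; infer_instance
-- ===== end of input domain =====

-- B re-implements the decode by a columnar decomposition: chunk into 5-tuples, transpose into the
-- five columns, prefix-sum the lines, segmented-prefix-sum the columns, zip back together; same
-- O(n) cost, alternative structure.

-- ===== PORT A =====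
-- A's loop: for each 5-chunk, unpack (dl, dc, length, tidx, mmask), update prev_line/prev_col.
-- (The Python raises ValueError on an incomplete trailing chunk; Pre_ excludes those inputs.)
def goA : Int → Int → List Int → List (Int × Int × Int × Int × Int)
  | pl, pc, dl :: dc :: len :: ti :: mm :: rest =>
      let line := pl + dl
      let col := if dl > 0 then dc else pc + dc
      (line, col, len, ti, mm) :: goA line col rest
  | _, _, _ => []

def data_to_absolute_py (data : List Int) : List (Int × Int × Int × Int × Int) :=
  goA 0 0 data

-- ===== PORT B =====
-- list(zip(it, it, it, it, it, strict=True)): chunk into 5-tuples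
-- (the Python raises ValueError on an incomplete trailing chunk; Pre_ excludes those inputs)
def chunks5 : List Int → List (Int × Int × Int × Int × Int)
  | a :: b :: c :: d :: e :: r => (a, b, c, d, e) :: chunks5 r
  | _ => []

-- running prefix sum (the `lines` loop of Source B)
def scanAdd : Int → List Int → List Int
  | _, [] => []
  | s, x :: xs => (s + x) :: scanAdd (s + x) xs

-- segmented prefix sum (the `cols` loop of Source B)
def segScan : Int → List (Int × Int) → List Int
  | _, [] => []
  | c, (dl, dc) :: ps =>
      let c' := if dl > 0 then dc else c + dc
      c' :: segScan c' ps

-- list(zip(a,b,c,d,e)) — truncates to the shortest, as Python's zip does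
def zip5 (a b c d e : List Int) : List (Int × Int × Int × Int × Int) :=
  a.zip (b.zip (c.zip (d.zip e)))

def data_to_absolute_py_alt (data : List Int) : List (Int × Int × Int × Int × Int) :=
  let cs := chunks5 data
  if cs.isEmpty then []
  else
    -- dls, dcs, lens, tids, mods = zip(*chunks): the five columns
    let dls := cs.map (fun t => t.1)
    let dcs := cs.map (fun t => t.2.1)
    let lens := cs.map (fun t => t.2.2.1)
    let tids := cs.map (fun t => t.2.2.2.1)
    let mods := cs.map (fun t => t.2.2.2.2)
    zip5 (scanAdd 0 dls) (segScan 0 (dls.zip dcs)) lens tids mods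

-- ===== PRECONDITION & SPEC =====
-- Pre_: both Pythons raise ValueError on a trailing incomplete 5-chunk (A when unpacking the short
-- slice, B in its strict zip), so Pre_ is exactly the inputs on which they return.
def Pre_data_to_absolute_py (data : List Int) : Prop := data.length % 5 = 0
instance (data : List Int) : Decidable (Pre_data_to_absolute_py data) := by unfold Pre_data_to_absolute_py; infer_instance
def pvWitness_data_to_absolute_py : List Int := [1, 2, 3, 4, 5]

def Spec_data_to_absolute_py (data : List Int) (out : List (Int × Int × Int × Int × Int)) : Prop := out = data_to_absolute_py_alt data
instance (data : List Int) (out : List (Int × Int × Int × Int × Int)) : Decidable (Spec_data_to_absolute_py data out) := by unfold Spec_data_to_absolute_py; infer_instance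

-- ===== CLAIM (what is proved, stated in full; the proofs are below) =====
def Claim_equal_data_to_absolute_py : Prop := ∀ (data : List Int), Dom_data_to_absolute_py data → Pre_data_to_absolute_py data → Spec_data_to_absolute_py data (data_to_absolute_py data)

-- ===== LEMMAS AND PROOFS =====

-- A's stateful loop, seeded with arbitrary accumulators, equals B's columnar pipeline on the chunks
theorem key : (data : List Int) → (pl pc : Int) →
    goA pl pc data =
      zip5 (scanAdd pl ((chunks5 data).map (fun t => t.1)))
           (segScan pc (((chunks5 data).map (fun t => t.1)).zip ((chunks5 data).map (fun t => t.2.1))))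
           ((chunks5 data).map (fun t => t.2.2.1))
           ((chunks5 data).map (fun t => t.2.2.2.1))
           ((chunks5 data).map (fun t => t.2.2.2.2))
  | [], _, _ => by simp [goA, chunks5, zip5]
  | [a], _, _ => by simp [goA, chunks5, zip5]
  | [a, b], _, _ => by simp [goA, chunks5, zip5]
  | [a, b, c], _, _ => by simp [goA, chunks5, zip5]
  | [a, b, c, d], _, _ => by simp [goA, chunks5, zip5]
  | a :: b :: c :: d :: e :: r, pl, pc => by
      have ih := key r (pl + a) (if a > 0 then b else pc + b)
      simp only [goA, chunks5, List.map_cons, List.zip_cons_cons, scanAdd, segScan, zip5] at ih ⊢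
      rw [ih]
  termination_by data => data.length

-- ===== VERDICT (by name: the statement is the Claim_ definition above) =====
theorem data_to_absolute_py_spec : Claim_equal_data_to_absolute_py := by
  intro data _ _
  unfold Spec_data_to_absolute_py data_to_absolute_py data_to_absolute_py_alt
  cases h : chunks5 data with
  | nil =>
      cases data with
      | nil => simp [goA]
      | cons x xs =>
          cases xs with
          | nil => simp [goA]
          | cons y ys => cases ys with
            | nil => simp [goA]
            | cons z zs => cases zs with
              | nil => simp [goA]
              | cons u us => cases us with
                | nil => simp [goA]
                | cons v vs => simp [chunks5] at h
  | cons t ts =>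
      have := key data 0 0
      simp only [h] at this ⊢
      simpa [List.isEmpty] using this
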